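-- pv_equiv track=rewrite | github.com/lucasbivar/coding-interviews | the-daily-byte/week_01/day_03_vacuum_cleaner_route.py | checkIfReturnToInit
-- ===== SOURCE A (Python) =====
-- def checkIfReturnToInit(sequenceOfMoves) -> bool:
--   # Time: O(n)
--   # Space: O(1)
--   posX = 0
--   posY = 0
--
--   for c in sequenceOfMoves:
--     if c == "L":
--       posX -= 1
--     elif c == "R":
--       posX += 1
--     elif c == "U":
--       posY += 1
--     elif c == "D":
--       posY -= 1
--
--   return True if posX == 0 and posY == 0 else False
-- ===== SOURCE B (Python) =====
-- MOVES = {'L': (-1, 0), 'R': (1, 0), 'U': (0, 1), 'D': (0, -1)}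
--
-- def checkIfReturnToInit(sequenceOfMoves) -> bool:
--   # Divide and conquer: the total displacement of a sequence is the
--   # vector sum of the displacements of its two halves.
--   def disp(s):
--     n = len(s)
--     if n == 0:
--       return (0, 0)
--     if n == 1:
--       return MOVES.get(s[0], (0, 0))
--     m = n // 2
--     x1, y1 = disp(s[:m])
--     x2, y2 = disp(s[m:])
--     return (x1 + x2, y1 + y2)
--   return disp(sequenceOfMoves) == (0, 0)
-- ===== Notes on version B (the rewrite author's own statement) =====
-- stated objective: alternative
-- what changed: Replaces A's single left-to-right loop over a running (x,y) position with a divide-and-conquer recursion: the string is split in half, each half's displacement vector (a table lookup at a single character) is computed recursively and the two vectors are summed; correctness rests on displacement being additive under concatenation.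
import Mathlib
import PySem

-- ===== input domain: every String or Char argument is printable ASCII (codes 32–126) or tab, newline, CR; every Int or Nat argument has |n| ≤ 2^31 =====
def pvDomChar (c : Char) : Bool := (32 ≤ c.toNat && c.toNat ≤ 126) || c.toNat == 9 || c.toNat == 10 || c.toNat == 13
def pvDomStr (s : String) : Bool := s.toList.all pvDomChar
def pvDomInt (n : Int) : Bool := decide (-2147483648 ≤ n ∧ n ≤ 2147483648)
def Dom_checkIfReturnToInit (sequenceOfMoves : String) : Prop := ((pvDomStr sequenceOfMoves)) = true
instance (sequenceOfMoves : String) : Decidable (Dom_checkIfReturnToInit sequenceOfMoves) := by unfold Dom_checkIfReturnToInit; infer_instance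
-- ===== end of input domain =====

-- B replaces A's running-position loop with a divide-and-conquer recursion summing
-- half-displacements (alternative algorithm, same O(n) cost).

-- ===== PORT A =====
def checkIfReturnToInit (sequenceOfMoves : String) : Bool :=
  let st := sequenceOfMoves.toList.foldl
    (fun (p : Int × Int) c =>
      if c == 'L' then (p.1 - 1, p.2)
      else if c == 'R' then (p.1 + 1, p.2)
      else if c == 'U' then (p.1, p.2 + 1)
      else if c == 'D' then (p.1, p.2 - 1)
      else p)
    ((0 : Int), (0 : Int))
  if st.1 = 0 ∧ st.2 = 0 then true else false

-- ===== PORT B =====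
-- the MOVES table of Source B
def pvMoves : PySem.Dict Char (Int × Int) :=
  PySem.Dict.ofList [('L', (-1, 0)), ('R', (1, 0)), ('U', (0, 1)), ('D', (0, -1))]

-- Source B's inner `disp`: s[:m]/s[m:] with 0 ≤ m ≤ len s are exactly take/drop
def pvDisp (s : List Char) : Int × Int :=
  if s.length = 0 then (0, 0)
  else if h1 : s.length = 1 then pvMoves.getD (s.headI) (0, 0)
  else
    let m := s.length / 2
    let d1 := pvDisp (s.take m)
    let d2 := pvDisp (s.drop m)
    (d1.1 + d2.1, d1.2 + d2.2)
termination_by s.length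
decreasing_by
  · simp only [List.length_take]; omega
  · simp only [List.length_drop]; omega

def checkIfReturnToInit_alt (sequenceOfMoves : String) : Bool :=
  pvDisp sequenceOfMoves.toList == ((0 : Int), (0 : Int))

-- ===== PRECONDITION & SPEC =====
def Spec_checkIfReturnToInit (sequenceOfMoves : String) (out : Bool) : Prop := out = checkIfReturnToInit_alt sequenceOfMoves
instance (sequenceOfMoves : String) (out : Bool) : Decidable (Spec_checkIfReturnToInit sequenceOfMoves out) := by unfold Spec_checkIfReturnToInit; infer_instance

-- ===== CLAIM (what is proved, stated in full; the proofs are below) =====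
def Claim_equal_checkIfReturnToInit : Prop := ∀ (sequenceOfMoves : String), Dom_checkIfReturnToInit sequenceOfMoves → Spec_checkIfReturnToInit sequenceOfMoves (checkIfReturnToInit sequenceOfMoves)

-- ===== LEMMAS AND PROOFS =====

-- invariant of A's fold: displacement = count differences
theorem pv_fold_counts (l : List Char) (x y : Int) :
    l.foldl
      (fun (p : Int × Int) c =>
        if c == 'L' then (p.1 - 1, p.2)
        else if c == 'R' then (p.1 + 1, p.2)
        else if c == 'U' then (p.1, p.2 + 1)
        else if c == 'D' then (p.1, p.2 - 1)
        else p)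
      (x, y)
    = (x + (l.count 'R' : Int) - l.count 'L', y + (l.count 'U' : Int) - l.count 'D') := by
  induction l generalizing x y with
  | nil => simp
  | cons c l ih =>
    by_cases hL : c = 'L'
    · subst hL; simp_all [Prod.ext_iff] <;> omega
    · by_cases hR : c = 'R'
      · subst hR; simp_all [Prod.ext_iff] <;> omega
      · by_cases hU : c = 'U'
        · subst hU; simp_all [Prod.ext_iff] <;> omega
        · by_cases hD : c = 'D'
          · subst hD; simp_all [Prod.ext_iff] <;> omega
          · simp_all [Prod.ext_iff] <;> omega

-- B's divide-and-conquer displacement also equals the count differences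
theorem pv_disp_counts (l : List Char) :
    pvDisp l = ((l.count 'R' : Int) - l.count 'L', (l.count 'U' : Int) - l.count 'D') := by
  induction l using pvDisp.induct with
  | case1 s h0 =>
    rw [List.length_eq_zero_iff] at h0
    subst h0; simp [pvDisp]
  | case2 s h0 h1 =>
    obtain ⟨c, hc⟩ := List.length_eq_one_iff.mp h1
    subst hc
    have hm : pvMoves = PySem.Dict.mk [('L', (-1, 0)), ('R', (1, 0)), ('U', (0, 1)), ('D', (0, -1))] := by decide
    rw [pvDisp]
    by_cases hL : c = 'L'
    · subst hL; decide
    · by_cases hR : c = 'R'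
      · subst hR; decide
      · by_cases hU : c = 'U'
        · subst hU; decide
        · by_cases hD : c = 'D'
          · subst hD; decide
          · simp_all [hm, PySem.Dict.getD_eq_get?_getD, PySem.Dict.get?_mk_cons]
            rw [if_neg (fun h => hL h.symm), if_neg (fun h => hR h.symm),
                if_neg (fun h => hU h.symm), if_neg (fun h => hD h.symm)]
            simp [PySem.Dict.get?]
  | case3 s h0 h1 m ih1 ih2 =>
    rw [pvDisp]
    simp only [h0, h1, if_false]
    show ((pvDisp (s.take m)).1 + (pvDisp (s.drop m)).1,
          (pvDisp (s.take m)).2 + (pvDisp (s.drop m)).2) = _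
    rw [ih1, ih2]
    have h := List.take_append_drop m s
    have hc : ∀ a : Char, s.count a = (s.take m).count a + (s.drop m).count a := by
      intro a; conv_lhs => rw [← h]
      rw [List.count_append]
    simp only [hc]
    push_cast
    simp only [Prod.mk.injEq]
    constructor <;> ring

theorem checkIfReturnToInit_spec : Claim_equal_checkIfReturnToInit := by
  intro s _
  unfold Spec_checkIfReturnToInit checkIfReturnToInit checkIfReturnToInit_alt
  simp only [pv_fold_counts, pv_disp_counts, zero_add]
  by_cases h1 : ((s.toList.count 'R' : Int) - s.toList.count 'L') = 0 <;>
    by_cases h2 : ((s.toList.count 'U' : Int) - s.toList.count 'D') = 0 <;>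
    simp_all
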